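-- pv_equiv track=rewrite | github.com/seororo358/AlgorithmEx | bad_user(kakao).py | solution
-- ===== SOURCE A (Python) =====
-- from itertools import product as pr
-- from itertools import combinations as comb
--
-- def solution(user_id, banned_id):
--     answer = 0
--     answer_set = set()
--     ban = dict()
--     for user in user_id:
--         for banned in banned_id:
--             true_tb = True
--             if len(user) != len(banned):
--                 continue
--             else:
--                 for i in range(len(banned)):
--                     if banned[i] == '*':
--                         pass
--                     elif banned[i] != user[i]:
--                         true_tb = False
--                         break
--                     else:
--                         pass
--             if true_tb:
--                 if user not in ban.keys():
--                     ban[user] = set()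
--                     ban[user].add(banned)
--                 else:
--                     ban[user].add(banned)
--
--     for user in ban.keys():
--         ban[user] = list(ban[user])
--
--     for combi in comb(ban.keys(),len(banned_id)):
--         st = []
--         for temp in combi:
--             st.append(ban[temp])
--
--         for prod in list(pr(*st)):
--             if sorted(banned_id) == sorted(prod):
--                 answer_set.add(tuple(sorted(combi)))
--
--     answer = len(answer_set)
--
--     return answer
-- ===== SOURCE B (Python) =====
-- def _matches(user, banned):
--     return len(user) == len(banned) and all(b == '*' or b == u for u, b in zip(user, banned))
--
--
-- def solution(user_id, banned_id):
--     # backtracking: assign each banned pattern a distinct matching user,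
--     # collect the distinct user-sets (as sorted tuples)
--     found = set()
--
--     def go(i, used):
--         if i == len(banned_id):
--             found.add(tuple(sorted(used)))
--             return
--         for u in user_id:
--             if u not in used and _matches(u, banned_id[i]):
--                 go(i + 1, used + [u])
--
--     go(0, [])
--     return len(found)
-- ===== Notes on version B (the rewrite author's own statement) =====
-- stated objective: faster
-- what changed: A enumerates every size-k combination of matching users and, for each, the full cartesian product of their candidate-pattern lists before comparing sorted tuples; B instead backtracks over the banned patterns, assigning each one a distinct matching user (pruning dead partial assignments immediately) and collecting the distinct user-sets.
import Mathlib
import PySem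

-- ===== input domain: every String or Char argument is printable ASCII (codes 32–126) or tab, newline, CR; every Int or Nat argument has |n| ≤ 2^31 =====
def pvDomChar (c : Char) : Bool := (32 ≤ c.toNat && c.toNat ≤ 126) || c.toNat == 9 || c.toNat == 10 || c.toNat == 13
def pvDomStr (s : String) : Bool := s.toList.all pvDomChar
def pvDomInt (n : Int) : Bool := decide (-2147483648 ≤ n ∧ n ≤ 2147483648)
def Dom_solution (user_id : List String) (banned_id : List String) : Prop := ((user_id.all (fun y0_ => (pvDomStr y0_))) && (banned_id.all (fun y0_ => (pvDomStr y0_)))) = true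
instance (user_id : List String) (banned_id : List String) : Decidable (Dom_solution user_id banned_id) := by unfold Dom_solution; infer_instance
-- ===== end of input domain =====

-- B replaces A's per-combination cartesian-product scan by backtracking that assigns each
-- banned pattern a distinct matching user and collects the distinct user-sets (objective: faster).

-- ===== PORT A =====
-- A's inner character loop 'for i in range(len(banned)): … break' (reached only under the
-- equal-length guard, where recursion over both char lists is index-exact)
def aCheck : List Char → List Char → Bool
  | [], _ => true
  | _ :: _, [] => true
  | b :: bs, u :: us => if b = '*' then aCheck bs us else if b ≠ u then false else aCheck bs us

-- hand port of itertools.product(*st) (not in PySem); exact values and order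
def prodAll {α : Type} : List (List α) → List (List α)
  | [] => [[]]
  | l :: ls => l.flatMap (fun x => (prodAll ls).map (x :: ·))

-- the dict 'ban' after A's first nested loop
def banDictA (user_id banned_id : List String) : PySem.Dict String (PySem.Set String) :=
  user_id.foldl (fun ban user =>
    banned_id.foldl (fun ban banned =>
      if PySem.Str.len user ≠ PySem.Str.len banned then ban
      else if aCheck banned.toList user.toList then
        (if ban.contains user = false then ban.insert user (PySem.Set.add PySem.Set.empty banned)
         else ban.insert user (PySem.Set.add (ban.getD user PySem.Set.empty) banned))
      else ban) ban) PySem.Dict.empty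

-- A's 'answer_set' ('ban[user] = list(ban[user])' is the identity here: a PySem.Set IS its element list)
def answerSetA (user_id banned_id : List String) : PySem.Set (List String) :=
  (PySem.List.combinations (banDictA user_id banned_id).keys banned_id.length).foldl
    (fun aset combi =>
      (prodAll (combi.foldl
          (fun st temp => st ++ [(banDictA user_id banned_id).getD temp PySem.Set.empty]) [])).foldl
        (fun aset prod =>
          if PySem.List.sorted banned_id (fun y => y) = PySem.List.sorted prod (fun y => y)
          then PySem.Set.add aset (PySem.List.sorted combi (fun y => y))
          else aset) aset)
    PySem.Set.empty

def solution (user_id : List String) (banned_id : List String) : Int :=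
  PySem.Set.len (answerSetA user_id banned_id)

-- ===== PORT B =====
def matchesB (u b : String) : Bool :=
  PySem.Str.len u == PySem.Str.len b &&
    (u.toList.zip b.toList).all (fun p => p.2 == '*' || p.2 == p.1)

-- B's recursive 'go(i, used)': give banned_id[i], banned_id[i+1], … a distinct matching user each
def goB (user_id : List String) : List String → List String → PySem.Set (List String) → PySem.Set (List String)
  | [], used, found => PySem.Set.add found (PySem.List.sorted used (fun y => y))
  | b :: bs, used, found =>
      user_id.foldl (fun fnd u =>
        if u ∉ used ∧ matchesB u b = true then goB user_id bs (used ++ [u]) fnd else fnd) found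

def solution_alt (user_id : List String) (banned_id : List String) : Int :=
  PySem.Set.len (goB user_id banned_id [] PySem.Set.empty)

-- ===== PRECONDITION & SPEC =====
def Spec_solution (user_id : List String) (banned_id : List String) (out : Int) : Prop := out = solution_alt user_id banned_id
instance (user_id : List String) (banned_id : List String) (out : Int) : Decidable (Spec_solution user_id banned_id out) := by unfold Spec_solution; infer_instance

-- ===== CLAIM (what is proved, stated in full; the proofs are below) =====
def Claim_equal_solution : Prop := ∀ (user_id : List String) (banned_id : List String), Dom_solution user_id banned_id → Spec_solution user_id banned_id (solution user_id banned_id)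

-- ===== LEMMAS AND PROOFS =====

-- A's char loop agrees with B's zip-all on equal-length strings
theorem aCheck_eq : ∀ (bs us : List Char), bs.length = us.length →
    aCheck bs us = (us.zip bs).all (fun p => p.2 == '*' || p.2 == p.1)
  | [], [], _ => rfl
  | [], _ :: _, h => by simp at h
  | _ :: _, [], h => by simp at h
  | b :: bs, u :: us, h => by
      rw [List.zip_cons_cons, List.all_cons, aCheck]
      rw [aCheck_eq bs us (by simpa using h)]
      by_cases hb : b = '*'
      · simp [hb]
      · by_cases hbu : b = u <;> simp [hb, hbu, Ne.symm]

-- A's per-(user, banned) dict step, rewritten through matchesB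
theorem step_eq (d : PySem.Dict String (PySem.Set String)) (user banned : String) :
    (if PySem.Str.len user ≠ PySem.Str.len banned then d
     else if aCheck banned.toList user.toList then
       (if d.contains user = false then d.insert user (PySem.Set.add PySem.Set.empty banned)
        else d.insert user (PySem.Set.add (d.getD user PySem.Set.empty) banned))
     else d)
    = if matchesB user banned = true then
        d.insert user (PySem.Set.add (d.getD user PySem.Set.empty) banned)
      else d := by
  by_cases hlen : PySem.Str.len user = PySem.Str.len banned
  · rw [if_neg (fun h => h hlen)]
    have hl : banned.toList.length = user.toList.length := by
      have h1 := PySem.Str.len_eq user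
      have h2 := PySem.Str.len_eq banned
      omega
    have hbeq : (PySem.Str.len user == PySem.Str.len banned) = true := by
      rw [hlen]; exact beq_self_eq_true _
    have hmB : matchesB user banned
        = (user.toList.zip banned.toList).all (fun p => p.2 == '*' || p.2 == p.1) := by
      rw [matchesB, hbeq, Bool.true_and]
    rw [aCheck_eq _ _ hl, hmB]
    cases hc : (user.toList.zip banned.toList).all (fun p => p.2 == '*' || p.2 == p.1) with
    | false => simp [hc]
    | true =>
        by_cases hcont : d.contains user = false
        · have hg : d.getD user PySem.Set.empty = PySem.Set.empty :=
            PySem.Dict.getD_of_not_contains d _ hcont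
          rw [hg]
          simp [hc, hcont]
        · simp [hc, hcont]
  · rw [if_pos hlen]
    have hbeq : (PySem.Str.len user == PySem.Str.len banned) = false := beq_eq_false_iff_ne.2 hlen
    have hmB : matchesB user banned = false := by rw [matchesB, hbeq, Bool.false_and]
    rw [hmB]
    simp

-- the A-port's ban dict is the clean conditional-insert fold
theorem banDictA_eq (uids bids : List String) :
    banDictA uids bids = uids.foldl (fun d user => bids.foldl
      (fun d b => if matchesB user b = true then
          d.insert user (PySem.Set.add (d.getD user PySem.Set.empty) b) else d) d)
      PySem.Dict.empty := by
  unfold banDictA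
  refine congrArg (fun F : PySem.Dict String (PySem.Set String) → String → PySem.Dict String (PySem.Set String) => List.foldl F PySem.Dict.empty uids) ?_
  funext d user
  refine congrArg (fun G : PySem.Dict String (PySem.Set String) → String → PySem.Dict String (PySem.Set String) => List.foldl G d bids) ?_
  funext d' b
  exact step_eq d' user b

-- get? through the inner fold over banned_id for one user
theorem inner_get? (u : String) : ∀ (bs : List String) (d : PySem.Dict String (PySem.Set String)) (x : String),
    ((bs.foldl (fun d b => if matchesB u b = true then
        d.insert u (PySem.Set.add (d.getD u PySem.Set.empty) b) else d) d).get? x)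
    = if x = u ∧ bs.filter (matchesB u) ≠ [] then
        some (PySem.Set.update (d.getD u PySem.Set.empty) (bs.filter (matchesB u)))
      else d.get? x
  | [], d, x => by simp
  | b :: bs, d, x => by
    rw [List.foldl_cons]
    by_cases hm : matchesB u b = true
    · rw [if_pos hm, inner_get? u bs _ x, List.filter_cons_of_pos hm]
      have hgd : (d.insert u (PySem.Set.add (d.getD u PySem.Set.empty) b)).getD u PySem.Set.empty
          = PySem.Set.add (d.getD u PySem.Set.empty) b :=
        PySem.Dict.getD_insert_self d u _ _
      by_cases hx : x = u
      · subst hx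
        by_cases hf : bs.filter (matchesB x) = []
        · rw [if_neg (fun h => h.2 hf), PySem.Dict.get?_insert_self,
            if_pos ⟨rfl, List.cons_ne_nil b _⟩, hf, PySem.Set.update_cons, PySem.Set.update_nil]
        · rw [if_pos ⟨rfl, hf⟩, hgd, if_pos ⟨rfl, List.cons_ne_nil b _⟩, PySem.Set.update_cons]
      · rw [if_neg (fun h => hx h.1), PySem.Dict.get?_insert_of_ne d _ hx,
          if_neg (fun h => hx h.1)]
    · rw [if_neg hm, inner_get? u bs d x]
      have hfil : List.filter (matchesB u) (b :: bs) = List.filter (matchesB u) bs := by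
        rw [List.filter_cons]
        simp [hm]
      rw [hfil]

-- get? of the full ban dict
theorem banDict_get? (uids bids : List String) (x : String) :
    (banDictA uids bids).get? x =
      if x ∈ uids ∧ bids.filter (matchesB x) ≠ [] then
        some (PySem.Set.ofList (bids.filter (matchesB x)))
      else none := by
  rw [banDictA_eq]
  induction uids using List.reverseRecOn with
  | nil => simp
  | append_singleton uids user ih =>
    rw [List.foldl_concat, inner_get? user bids _ x]
    by_cases hx : x = user
    · subst hx
      by_cases hfl : bids.filter (matchesB x) = []
      · rw [if_neg (fun h => h.2 hfl), ih, if_neg (fun h => h.2 hfl), if_neg (fun h => h.2 hfl)]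
      · rw [if_pos ⟨rfl, hfl⟩, if_pos ⟨List.mem_append.2 (Or.inr (List.mem_singleton.2 rfl)), hfl⟩,
          PySem.Dict.getD_eq_get?_getD, ih]
        by_cases hmem : x ∈ uids
        · rw [if_pos ⟨hmem, hfl⟩]
          simp only [Option.getD_some]
          congr 1
          rw [PySem.Set.update_eq_append_filter]
          have hnil : List.filter (fun y => !(PySem.Set.ofList (bids.filter (matchesB x))).contains y)
              (PySem.Set.ofList (bids.filter (matchesB x))) = [] := by
            rw [List.filter_eq_nil_iff]
            intro a ha
            simp only [Bool.not_eq_true', Bool.not_eq_false]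
            exact (PySem.Set.contains_iff _ _).2 ha
          rw [hnil, List.append_nil]
        · rw [if_neg (fun h => hmem h.1)]
          simp only [Option.getD_none]
          exact congrArg some (PySem.Set.update_empty _)
    · rw [if_neg (fun h => hx h.1), ih]
      by_cases hcond : x ∈ uids ∧ bids.filter (matchesB x) ≠ []
      · rw [if_pos hcond, if_pos ⟨List.mem_append.2 (Or.inl hcond.1), hcond.2⟩]
      · rw [if_neg hcond, if_neg (fun h => hcond ⟨by
          rcases List.mem_append.1 h.1 with h' | h'
          · exact h'
          · exact absurd (List.mem_singleton.1 h') hx, h.2⟩)]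

theorem mem_keys_banDict (uids bids : List String) (u : String) :
    u ∈ (banDictA uids bids).keys ↔ u ∈ uids ∧ ∃ b ∈ bids, matchesB u b = true := by
  have hfl : (bids.filter (matchesB u) ≠ []) ↔ ∃ b ∈ bids, matchesB u b = true := by
    rw [Ne, List.filter_eq_nil_iff]
    push_neg
    simp
  have h1 : u ∈ (banDictA uids bids).keys ↔ ¬ ((banDictA uids bids).get? u = none) := by
    rw [PySem.Dict.get?_eq_none_iff_not_mem_keys, not_not]
  rw [h1, banDict_get?]
  by_cases hcond : u ∈ uids ∧ bids.filter (matchesB u) ≠ []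
  · rw [if_pos hcond]
    exact iff_of_true (by simp) ⟨hcond.1, hfl.1 hcond.2⟩
  · rw [if_neg hcond]
    exact iff_of_false (fun h => h rfl) (fun h => hcond ⟨h.1, hfl.2 h.2⟩)

-- generic: a predicate preserved by every fold step
theorem foldl_pres {β σ : Type} (P : σ → Prop) :
    ∀ (l : List β) (F : σ → β → σ), (∀ s e, P s → P (F s e)) → ∀ s0, P s0 → P (l.foldl F s0)
  | [], _, _, _, h0 => h0
  | e :: t, F, h, s0, h0 => foldl_pres P t F h (F s0 e) (h s0 e h0)

theorem nodup_keys_banDict (uids bids : List String) : (banDictA uids bids).keys.Nodup := by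
  rw [banDictA_eq]
  refine foldl_pres (fun d : PySem.Dict String (PySem.Set String) => d.keys.Nodup) uids _ (fun d user hd => ?_) _ PySem.Dict.nodup_keys_empty
  refine foldl_pres (fun d : PySem.Dict String (PySem.Set String) => d.keys.Nodup) bids _ (fun d' b hd' => ?_) d hd
  by_cases hm : matchesB user b = true
  · rw [if_pos hm]; exact PySem.Dict.nodup_keys_insert _ _ _ hd'
  · rw [if_neg hm]; exact hd'

theorem mem_candA (uids bids : List String) (u p : String) :
    p ∈ (banDictA uids bids).getD u PySem.Set.empty ↔
      u ∈ uids ∧ p ∈ bids ∧ matchesB u p = true := by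
  rw [PySem.Dict.getD_eq_get?_getD, banDict_get?]
  by_cases hcond : u ∈ uids ∧ bids.filter (matchesB u) ≠ []
  · rw [if_pos hcond]
    simp only [Option.getD_some]
    rw [PySem.Set.mem_ofList, List.mem_filter]
    constructor
    · rintro ⟨hb, hm⟩; exact ⟨hcond.1, hb, hm⟩
    · rintro ⟨_, hb, hm⟩; exact ⟨hb, hm⟩
  · rw [if_neg hcond]
    simp only [Option.getD_none]
    constructor
    · intro hp; simp [PySem.Set.empty] at hp
    · rintro ⟨hu, hb, hm⟩
      refine absurd ⟨hu, fun hfl => ?_⟩ hcond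
      rw [List.filter_eq_nil_iff] at hfl
      exact hfl _ hb (by simpa using hm)

-- generic: membership through a fold that only grows a list
theorem mem_foldl_grow {β γ : Type} (Q : β → Prop) (x : γ) :
    ∀ (l : List β) (F : List γ → β → List γ),
      (∀ s e, e ∈ l → (x ∈ F s e ↔ x ∈ s ∨ Q e)) →
      ∀ s0, (x ∈ l.foldl F s0 ↔ x ∈ s0 ∨ ∃ e ∈ l, Q e)
  | [], _, _, s0 => by simp
  | e :: t, F, h, s0 => by
      rw [List.foldl_cons,
        mem_foldl_grow Q x t F (fun s e' he' => h s e' (List.mem_cons_of_mem _ he')) (F s0 e),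
        h s0 e List.mem_cons_self]
      simp only [List.mem_cons]
      constructor
      · rintro (⟨hx | hq⟩ | ⟨e', he', hq⟩)
        · exact Or.inl hx
        · exact Or.inr ⟨e, Or.inl rfl, hq⟩
        · exact Or.inr ⟨e', Or.inr he', hq⟩
      · rintro (hx | ⟨e', (rfl | he'), hq⟩)
        · exact Or.inl (Or.inl hx)
        · exact Or.inl (Or.inr hq)
        · exact Or.inr ⟨e', he', hq⟩

theorem mem_prodAll {α : Type} : ∀ (ls : List (List α)) (p : List α),
    p ∈ prodAll ls ↔ List.Forall₂ (fun x l => x ∈ l) p ls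
  | [], p => by
      simp [prodAll, List.forall₂_nil_right_iff]
  | l :: ls, p => by
      simp only [prodAll, List.mem_flatMap, List.mem_map]
      constructor
      · rintro ⟨x, hx, q, hq, rfl⟩
        exact List.Forall₂.cons hx ((mem_prodAll ls q).1 hq)
      · intro h
        cases h with
        | cons hx hq => exact ⟨_, hx, _, (mem_prodAll ls _).2 hq, rfl⟩

theorem mem_answerSetA (uids bids : List String) (x : List String) :
    x ∈ answerSetA uids bids ↔
      ∃ combi, (combi.Sublist (banDictA uids bids).keys ∧ combi.length = bids.length) ∧
        (∃ pr, List.Forall₂ (fun q u => q ∈ (banDictA uids bids).getD u PySem.Set.empty) pr combi ∧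
          PySem.List.sorted bids (fun y => y) = PySem.List.sorted pr (fun y => y)) ∧
        x = PySem.List.sorted combi (fun y => y) := by
  unfold answerSetA
  rw [mem_foldl_grow
      (fun combi => ∃ pr, pr ∈ prodAll (combi.map (fun temp => (banDictA uids bids).getD temp PySem.Set.empty)) ∧
        (PySem.List.sorted bids (fun y => y) = PySem.List.sorted pr (fun y => y) ∧
          x = PySem.List.sorted combi (fun y => y))) x _ _
      (fun s combi _ => by
        rw [PySem.List.foldl_append_singleton_eq_map
            (fun temp => (banDictA uids bids).getD temp PySem.Set.empty) combi [], List.nil_append]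
        rw [mem_foldl_grow
            (fun pr => PySem.List.sorted bids (fun y => y) = PySem.List.sorted pr (fun y => y) ∧
              x = PySem.List.sorted combi (fun y => y)) x _ _
            (fun s' pr _ => by
              by_cases hc : PySem.List.sorted bids (fun y => y) = PySem.List.sorted pr (fun y => y)
              · rw [if_pos hc, PySem.Set.mem_add]
                constructor
                · rintro (h | h)
                  · exact Or.inl h
                  · exact Or.inr ⟨hc, h⟩
                · rintro (h | ⟨_, h⟩)
                  · exact Or.inl h
                  · exact Or.inr h
              · rw [if_neg hc]
                constructor
                · exact Or.inl
                · rintro (h | ⟨hcc, _⟩)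
                  · exact h
                  · exact absurd hcc hc) s]) PySem.Set.empty]
  constructor
  · rintro (h | ⟨combi, hcm, pr, hpr, hsort, hx⟩)
    · simp [PySem.Set.empty] at h
    · rcases (PySem.List.mem_combinations_iff _ _ _).1 hcm with ⟨hsub, hlen⟩
      refine ⟨combi, ⟨hsub, hlen⟩, ⟨pr, ?_, hsort⟩, hx⟩
      have := (mem_prodAll _ pr).1 hpr
      exact List.forall₂_map_right_iff.1 this
  · rintro ⟨combi, ⟨hsub, hlen⟩, ⟨pr, hf, hsort⟩, hx⟩
    refine Or.inr ⟨combi, (PySem.List.mem_combinations_iff _ _ _).2 ⟨hsub, hlen⟩,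
      pr, (mem_prodAll _ pr).2 (List.forall₂_map_right_iff.2 hf), hsort, hx⟩

theorem nodup_answerSetA (uids bids : List String) : (answerSetA uids bids).Nodup := by
  unfold answerSetA
  refine foldl_pres (fun (s : PySem.Set (List String)) => s.Nodup) _ _ (fun s combi hs => ?_) _ List.nodup_nil
  refine foldl_pres (fun (s : PySem.Set (List String)) => s.Nodup) _ _ (fun s' pr hs' => ?_) s hs
  by_cases hc : PySem.List.sorted bids (fun y => y) = PySem.List.sorted pr (fun y => y)
  · rw [if_pos hc]; exact PySem.Set.nodup_add _ _ hs'
  · rw [if_neg hc]; exact hs'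

theorem mem_goB (uids : List String) (x : List String) :
    ∀ (bs used : List String) (found : PySem.Set (List String)),
      x ∈ goB uids bs used found ↔ x ∈ found ∨
        ∃ ext, List.Forall₂ (fun u b => u ∈ uids ∧ matchesB u b = true) ext bs ∧
          ext.Nodup ∧ (∀ u ∈ ext, u ∉ used) ∧
          x = PySem.List.sorted (used ++ ext) (fun y => y) := by
  intro bs
  induction bs with
  | nil =>
      intro used found
      rw [goB, PySem.Set.mem_add]
      constructor
      · rintro (h | h)
        · exact Or.inl h
        · exact Or.inr ⟨[], List.Forall₂.nil, List.nodup_nil, by simp, by simpa using h⟩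
      · rintro (h | ⟨ext, hf, _, _, hx⟩)
        · exact Or.inl h
        · cases hf
          exact Or.inr (by simpa using hx)
  | cons b bs ih =>
      intro used found
      rw [goB]
      rw [mem_foldl_grow
          (fun u => (u ∉ used ∧ matchesB u b = true) ∧
            ∃ ext', List.Forall₂ (fun u b => u ∈ uids ∧ matchesB u b = true) ext' bs ∧
              ext'.Nodup ∧ (∀ v ∈ ext', v ∉ used ++ [u]) ∧
              x = PySem.List.sorted ((used ++ [u]) ++ ext') (fun y => y)) x _ _
          (fun s u _ => by
            by_cases hc : u ∉ used ∧ matchesB u b = true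
            · rw [if_pos hc, ih (used ++ [u]) s]
              constructor
              · rintro (h | ⟨ext', h1, h2, h3, h4⟩)
                · exact Or.inl h
                · exact Or.inr ⟨hc, ext', h1, h2, h3, h4⟩
              · rintro (h | ⟨_, ext', h1, h2, h3, h4⟩)
                · exact Or.inl h
                · exact Or.inr ⟨ext', h1, h2, h3, h4⟩
            · rw [if_neg hc]
              constructor
              · exact Or.inl
              · rintro (h | ⟨hcc, _⟩)
                · exact h
                · exact absurd hcc hc) found]
      constructor
      · rintro (h | ⟨u, hu, ⟨hnu, hmb⟩, ext', hf, hnd, hnotin, hx⟩)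
        · exact Or.inl h
        · refine Or.inr ⟨u :: ext', List.Forall₂.cons ⟨hu, hmb⟩ hf, ?_, ?_, ?_⟩
          · rw [List.nodup_cons]
            refine ⟨fun hmem => ?_, hnd⟩
            exact (hnotin u hmem) (List.mem_append.2 (Or.inr (List.mem_singleton.2 rfl)))
          · intro v hv
            rcases List.mem_cons.1 hv with rfl | hv'
            · exact hnu
            · exact fun hvu => (hnotin v hv') (List.mem_append.2 (Or.inl hvu))
          · rw [hx]
            congr 1
            simp
      · rintro (h | ⟨ext, hf, hnd, hnotin, hx⟩)
        · exact Or.inl h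
        · cases hf with
          | cons hub hf' =>
              rename_i u ext'
              refine Or.inr ⟨u, hub.1, ⟨hnotin u List.mem_cons_self, hub.2⟩,
                ext', hf', (List.nodup_cons.1 hnd).2, ?_, ?_⟩
              · intro v hv
                rw [List.mem_append]
                rintro (hvu | hvu)
                · exact (hnotin v (List.mem_cons_of_mem _ hv)) hvu
                · exact (List.nodup_cons.1 hnd).1 (by rwa [List.mem_singleton.1 hvu] at hv)
              · rw [hx]
                congr 1
                simp

theorem nodup_goB (uids : List String) :
    ∀ (bs used : List String) (found : PySem.Set (List String)),
      found.Nodup → (goB uids bs used found).Nodup := by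
  intro bs
  induction bs with
  | nil => intro used found h; rw [goB]; exact PySem.Set.nodup_add _ _ h
  | cons b bs ih =>
      intro used found h
      rw [goB]
      refine foldl_pres (fun (s : PySem.Set (List String)) => s.Nodup) uids _ (fun s u hs => ?_) found h
      by_cases hc : u ∉ used ∧ matchesB u b = true
      · rw [if_pos hc]; exact ih _ s hs
      · rw [if_neg hc]; exact hs

theorem forall2_perm_right {α β : Type} {S : α → β → Prop} :
    ∀ {ys zs : List β}, ys.Perm zs → ∀ {xs : List α}, List.Forall₂ S xs ys →
      ∃ xs', xs'.Perm xs ∧ List.Forall₂ S xs' zs := by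
  intro ys zs hp
  induction hp with
  | nil => intro xs h; cases h; exact ⟨[], List.Perm.refl _, List.Forall₂.nil⟩
  | cons y _ ih =>
      intro xs h
      cases h with
      | cons hx htail =>
          obtain ⟨xs', hperm, hf⟩ := ih htail
          exact ⟨_ :: xs', List.Perm.cons _ hperm, List.Forall₂.cons hx hf⟩
  | swap y y' t =>
      intro xs h
      cases h with
      | cons h1 h2 =>
          cases h2 with
          | cons h2' h3 =>
              exact ⟨_, List.Perm.swap _ _ _, List.Forall₂.cons h2' (List.Forall₂.cons h1 h3)⟩
  | trans _ _ ih1 ih2 =>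
      intro xs h
      obtain ⟨xs1, hp1, hf1⟩ := ih1 h
      obtain ⟨xs2, hp2, hf2⟩ := ih2 hf1
      exact ⟨xs2, hp2.trans hp1, hf2⟩

theorem forall2_perm_left {α β : Type} {S : α → β → Prop} {xs xs' : List α} {ys : List β}
    (hp : xs'.Perm xs) (h : List.Forall₂ S xs ys) :
    ∃ ys', ys'.Perm ys ∧ List.Forall₂ S xs' ys' := by
  obtain ⟨ys', hperm, hf⟩ := forall2_perm_right (S := flip S) hp.symm h.flip
  exact ⟨ys', hperm, hf.flip⟩

theorem forall2_mem_left {α β : Type} {S : α → β → Prop} :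
    ∀ {xs : List α} {ys : List β}, List.Forall₂ S xs ys → ∀ {u}, u ∈ xs → ∃ b ∈ ys, S u b := by
  intro xs ys h
  induction h with
  | nil => intro u hu; cases hu
  | cons hx _ ih =>
      intro u hu
      rcases List.mem_cons.1 hu with rfl | hu
      · exact ⟨_, List.mem_cons_self, hx⟩
      · obtain ⟨b, hb, hS⟩ := ih hu
        exact ⟨b, List.mem_cons_of_mem _ hb, hS⟩

theorem forall2_imp_mem {α β : Type} {S S' : α → β → Prop} :
    ∀ {xs : List α} {ys : List β}, List.Forall₂ S xs ys →
      (∀ a b, a ∈ xs → b ∈ ys → S a b → S' a b) → List.Forall₂ S' xs ys := by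
  intro xs ys h
  induction h with
  | nil => intro _; exact List.Forall₂.nil
  | cons hx htail ih =>
      intro himp
      exact List.Forall₂.cons
        (himp _ _ (List.mem_cons_self) (List.mem_cons_self) hx)
        (ih (fun a b ha hb => himp a b (List.mem_cons_of_mem _ ha) (List.mem_cons_of_mem _ hb)))

-- the heart: A's combination-plus-product witness ⟺ B's backtracking witness
theorem bridge (uids bids : List String) (x : List String) :
    (∃ combi, (combi.Sublist (banDictA uids bids).keys ∧ combi.length = bids.length) ∧
        (∃ pr, List.Forall₂ (fun q u => q ∈ (banDictA uids bids).getD u PySem.Set.empty) pr combi ∧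
          PySem.List.sorted bids (fun y => y) = PySem.List.sorted pr (fun y => y)) ∧
        x = PySem.List.sorted combi (fun y => y))
    ↔ (∃ ext, List.Forall₂ (fun u b => u ∈ uids ∧ matchesB u b = true) ext bids ∧
        ext.Nodup ∧ x = PySem.List.sorted ext (fun y => y)) := by
  constructor
  · rintro ⟨combi, ⟨hsub, _⟩, ⟨pr, hf, hsort⟩, hx⟩
    have hperm : bids.Perm pr := (PySem.List.sorted_id_eq_sorted_id_iff_perm bids pr).1 hsort
    have hf' : List.Forall₂ (fun u q => q ∈ (banDictA uids bids).getD u PySem.Set.empty) combi pr :=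
      List.Forall₂.flip hf
    obtain ⟨ext, hpe, hf2⟩ := forall2_perm_right hperm.symm hf'
    refine ⟨ext, ?_, ?_, ?_⟩
    · exact forall2_imp_mem hf2 (fun u b _ _ hq => by
        rcases (mem_candA uids bids u b).1 hq with ⟨h1, _, h3⟩
        exact ⟨h1, h3⟩)
    · exact (hpe.nodup_iff).2 (hsub.nodup (nodup_keys_banDict uids bids))
    · rw [hx]
      exact (PySem.List.sorted_eq_sorted_of_perm ext combi (fun y => y) (fun a b h => h) hpe).symm
  · rintro ⟨ext, hf, hnd, hx⟩
    have hsubset : ∀ u ∈ ext, u ∈ (banDictA uids bids).keys := by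
      intro u hu
      obtain ⟨b, hb, h1, h2⟩ := forall2_mem_left hf hu
      exact (mem_keys_banDict uids bids u).2 ⟨h1, b, hb, h2⟩
    obtain ⟨combi, hpc, hsub⟩ := hnd.subperm hsubset
    have hlen : combi.length = bids.length := by
      rw [hpc.length_eq]
      exact hf.length_eq
    obtain ⟨pr, hpb, hf2⟩ := forall2_perm_left hpc hf
    refine ⟨combi, ⟨hsub, hlen⟩, ⟨pr, ?_, ?_⟩, ?_⟩
    · refine List.Forall₂.flip (forall2_imp_mem hf2 (fun u q _ hq hS => ?_))
      exact (mem_candA uids bids u q).2 ⟨hS.1, hpb.subset hq, hS.2⟩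
    · exact (PySem.List.sorted_id_eq_sorted_id_iff_perm bids pr).2 hpb.symm
    · rw [hx]
      exact (PySem.List.sorted_eq_sorted_of_perm combi ext (fun y => y) (fun a b h => h) hpc).symm

-- ===== VERDICT (by name: the statement is the Claim_ definition above) =====
theorem solution_spec : Claim_equal_solution := by
  intro uids bids _
  unfold Spec_solution
  have hA := nodup_answerSetA uids bids
  have hB : (goB uids bids [] PySem.Set.empty).Nodup :=
    nodup_goB uids bids [] PySem.Set.empty List.nodup_nil
  have hmem : ∀ x, x ∈ answerSetA uids bids ↔ x ∈ goB uids bids [] PySem.Set.empty := by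
    intro x
    rw [mem_answerSetA, mem_goB]
    constructor
    · intro h
      obtain ⟨ext, h1, h2, h3⟩ := (bridge uids bids x).1 h
      exact Or.inr ⟨ext, h1, h2, by simp, by simpa using h3⟩
    · rintro (h | ⟨ext, h1, h2, _, h3⟩)
      · simp [PySem.Set.empty] at h
      · exact (bridge uids bids x).2 ⟨ext, h1, h2, by simpa using h3⟩
  have hperm : (answerSetA uids bids).Perm (goB uids bids [] PySem.Set.empty) :=
    (List.perm_ext_iff_of_nodup hA hB).2 hmem
  show solution uids bids = solution_alt uids bids
  unfold solution solution_alt PySem.Set.len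
  exact_mod_cast hperm.length_eq
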